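-- pv_equiv track=rewrite | github.com/nkritsky/algo_course | remove_white_spaces.py | remove_white_spaces
-- ===== SOURCE A (Python) =====
-- def remove_white_spaces (s):
--   read_p = 0
--   write_p = 0
--   for c in s:
--     if s[read_p] != ' ' and s[read_p] != '\t':
--       s[write_p] = s[read_p]
--       write_p += 1
--     read_p +=1
--   s[write_p]='\0'
--   return s
-- ===== SOURCE B (Python) =====
-- def remove_white_spaces(s):
--     kept = [c for c in s if c != ' ' and c != '\t']
--     k = len(kept)
--     s[k] = '\0'      # unguarded, like the sentinel write in any version of this task
--     s[:k] = kept
--     return s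
-- ===== Notes on version B (the rewrite author's own statement) =====
-- stated objective: simpler
-- what changed: Replaces A's fused two-pointer read/write loop with a two-pass decomposition: build the filtered characters via a comprehension, then write them back with a slice assignment and place the sentinel.
import Mathlib
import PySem

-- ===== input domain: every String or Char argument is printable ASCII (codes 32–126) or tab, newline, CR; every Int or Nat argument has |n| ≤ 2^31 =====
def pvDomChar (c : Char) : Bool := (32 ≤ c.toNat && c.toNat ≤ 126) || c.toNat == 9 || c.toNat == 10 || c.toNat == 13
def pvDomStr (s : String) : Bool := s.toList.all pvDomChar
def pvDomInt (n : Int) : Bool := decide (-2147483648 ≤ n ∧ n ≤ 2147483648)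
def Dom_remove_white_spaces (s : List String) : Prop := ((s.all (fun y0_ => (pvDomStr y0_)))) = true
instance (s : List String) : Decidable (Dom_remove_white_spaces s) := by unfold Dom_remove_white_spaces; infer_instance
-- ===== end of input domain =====

-- B replaces A's fused two-pointer compaction loop with a filter pass plus a write-back pass
-- (simpler decomposition, same cost). Both A and B mutate the list in place; on inputs in Pre_
-- they leave the SAME final list, which is also the return value proved equal here.

-- ===== PORT A =====
-- A's for-loop over s with read/write pointers; the pointers stay in range on every
-- iteration (read_p < len, write_p ≤ read_p), so getD/set are exact for Python's s[i] there.
def rwsLoopA (t : List String) (write_p : Nat) : List String → List String × Nat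
  | [] => (t, write_p)
  | _ :: rest =>
      let c := t.getD (t.length - rest.length - 1) ""   -- s[read_p]; read_p = processed count, in range
      if c ≠ " " ∧ c ≠ "\t" then
        rwsLoopA (t.set write_p c) (write_p + 1) rest
      else
        rwsLoopA t write_p rest

def remove_white_spaces (s : List String) : List String :=
  let (t, write_p) := rwsLoopA s 0 s
  t.set write_p "\x00"   -- s[write_p] = '\0'; Pre_ guarantees write_p < len (Python raises otherwise)

-- ===== PORT B =====
def remove_white_spaces_alt (s : List String) : List String :=
  let kept := s.filter (fun c => c ≠ " " ∧ c ≠ "\t")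
  let k := kept.length
  let s1 := s.set k "\x00"          -- s[k] = '\0'; in range under Pre_
  kept ++ s1.drop k               -- s[:k] = kept (slice assignment of equal length)

-- ===== PRECONDITION & SPEC =====
-- Pre_ excludes exactly the inputs with no ' ' and no '\t' element, on which both Pythons
-- raise IndexError at the unguarded sentinel write s[write_p] = '\0'.
def Pre_remove_white_spaces (s : List String) : Prop := " " ∈ s ∨ "\t" ∈ s
instance (s : List String) : Decidable (Pre_remove_white_spaces s) := by unfold Pre_remove_white_spaces; infer_instance
def pvWitness_remove_white_spaces : List String := (["a", " ", "b"])

def Spec_remove_white_spaces (s : List String) (out : List String) : Prop := out = remove_white_spaces_alt s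
instance (s : List String) (out : List String) : Decidable (Spec_remove_white_spaces s out) := by unfold Spec_remove_white_spaces; infer_instance

-- ===== CLAIM (what is proved, stated in full; the proofs are below) =====
def Claim_equal_remove_white_spaces : Prop := ∀ (s : List String), Dom_remove_white_spaces s → Pre_remove_white_spaces s → Spec_remove_white_spaces s (remove_white_spaces s)

-- ===== LEMMAS AND PROOFS =====

-- Loop invariant: processing `rest` with the list split as K ++ mid ++ rest (K the kept
-- prefix, mid already-read garbage of the right length, write_p = |K|) yields the kept
-- characters followed by the untouched tail, and write_p ends at the number kept.
theorem rwsLoopA_inv (rest : List String) : ∀ (K mid : List String),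
    rwsLoopA (K ++ mid ++ rest) K.length rest
      = (K ++ (rest.filter (fun c => c ≠ " " ∧ c ≠ "\t"))
           ++ ((mid ++ rest).drop (rest.filter (fun c => c ≠ " " ∧ c ≠ "\t")).length),
         K.length + (rest.filter (fun c => c ≠ " " ∧ c ≠ "\t")).length) := by
  induction rest with
  | nil => intro K mid; simp [rwsLoopA]
  | cons c rest ih =>
    intro K mid
    have hget : (K ++ mid ++ (c :: rest)).getD ((K ++ mid ++ (c :: rest)).length - rest.length - 1) "" = c := by
      have : (K ++ mid ++ (c :: rest)).length - rest.length - 1 = K.length + mid.length := by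
        simp; omega
      rw [this]; simp [List.getD]
    by_cases hc : c ≠ " " ∧ c ≠ "\t"
    · -- kept character: written at write_p = K.length
      have hset : (K ++ mid ++ (c :: rest)).set K.length c
          = (K ++ [c]) ++ (mid.drop 1 ++ (c :: rest).take (min 1 mid.length)) ++ rest := by
        cases mid with
        | nil => simp
        | cons m0 mid' => simp [List.set_append_right]
      have hrec := ih (K ++ [c]) (mid.drop 1 ++ (c :: rest).take (min 1 mid.length))
      simp only [List.length_append, List.length_cons, List.length_nil] at hrec
      simp only [rwsLoopA, hget, if_pos hc, hset]
      rw [hrec]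
      simp only [Prod.mk.injEq]
      constructor
      · cases mid with
        | nil => simp [hc.1, hc.2]
        | cons m0 mid' => simp [hc.1, hc.2, List.filter]
      · simp [hc.1, hc.2]; omega
    · -- skipped character: the garbage region mid grows by one
      have hre : K ++ mid ++ (c :: rest) = K ++ (mid ++ [c]) ++ rest := by simp
      have hrec := ih K (mid ++ [c])
      rw [hre] at hget
      simp only [rwsLoopA, hre]
      rw [hget, if_neg hc, hrec]
      have hc' : c = " " ∨ c = "\t" := by
        by_contra h
        exact hc ⟨fun h1 => h (Or.inl h1), fun h2 => h (Or.inr h2)⟩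
      simp only [Prod.mk.injEq]
      constructor
      · rcases hc' with h | h <;> simp [h]
      · rcases hc' with h | h <;> simp [h]

theorem set_drop_comm (l : List String) (k : Nat) (a : String) :
    (l.set k a).drop k = (l.drop k).set 0 a := by
  induction l generalizing k with
  | nil => simp
  | cons x xs ih =>
    cases k with
    | zero => simp
    | succ k => simpa using ih k

-- ===== VERDICT (by name: the statement is the Claim_ definition above) =====
theorem remove_white_spaces_spec : Claim_equal_remove_white_spaces := by
  intro s _ _
  show _ = _
  have h := rwsLoopA_inv s [] []
  simp only [List.nil_append, List.append_nil, List.length_nil] at h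
  simp only [remove_white_spaces, remove_white_spaces_alt, set_drop_comm, h]
  rw [List.set_append_right _ _ (by simp)]
  simp
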